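-- pv_equiv track=rewrite | github.com/Vergil0327/leetcode-history | Trees/LCA/2509. Cycle Length Queries in a Tree/solution.py | cycleLengthQueries
-- ===== SOURCE A (Python) =====
-- from typing import List
--
-- def cycleLengthQueries(n: int, queries: List[List[int]]) -> List[int]:
--     res = []
--     for u, v in queries:
--         length = 1 # added edge
--         while u != v: # find way back until reach LCA
--             if v > u:
--                 v //= 2
--             else:
--                 u //= 2
--             length += 1
--         res.append(length)
--     return res
-- ===== SOURCE B (Python) =====
-- from typing import List
--
-- def _bits(x):
--     # binary digits of x, most-significant first ([] for x <= 0)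
--     d = []
--     while x > 0:
--         d.append(x % 2)
--         x //= 2
--     d.reverse()
--     return d
--
-- def _lcp(a, b):
--     # length of the longest common prefix of two lists
--     p = 0
--     for x, y in zip(a, b):
--         if x != y:
--             break
--         p += 1
--     return p
--
-- def cycleLengthQueries(n: int, queries: List[List[int]]) -> List[int]:
--     # A node's root path is encoded by its binary digits; the LCA is the
--     # longest common digit prefix, so the cycle length is a closed formula.
--     return [_cycle(u, v) for u, v in queries]
--
-- def _cycle(u, v):
--     a, b = _bits(u), _bits(v)
--     return len(a) + len(b) - 2 * _lcp(a, b) + 1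
-- ===== Notes on version B (the rewrite author's own statement) =====
-- stated objective: alternative
-- what changed: Replaces the step-by-step interleaved upward walk to the LCA by a closed formula on the binary digit strings of u and v: answer = bitlen(u)+bitlen(v)-2*(longest common digit prefix)+1.
import Mathlib
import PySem

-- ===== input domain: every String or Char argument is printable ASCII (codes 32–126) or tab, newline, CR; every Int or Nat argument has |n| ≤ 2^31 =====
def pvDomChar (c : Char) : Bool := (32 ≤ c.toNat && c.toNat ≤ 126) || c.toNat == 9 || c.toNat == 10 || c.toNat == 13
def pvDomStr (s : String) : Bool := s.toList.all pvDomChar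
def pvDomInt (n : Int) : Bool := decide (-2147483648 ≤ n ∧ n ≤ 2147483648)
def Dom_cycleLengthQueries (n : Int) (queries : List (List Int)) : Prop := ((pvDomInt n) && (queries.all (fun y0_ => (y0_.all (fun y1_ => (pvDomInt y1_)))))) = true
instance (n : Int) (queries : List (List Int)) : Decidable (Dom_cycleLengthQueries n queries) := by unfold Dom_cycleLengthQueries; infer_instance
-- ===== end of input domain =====

-- B replaces A's step-by-step upward walk to the LCA by a closed formula on the
-- binary digit lists of u and v (bitlen u + bitlen v - 2*lcp + 1); return-value
-- equivalence is proved on queries [u,v] with u,v ≥ 0 (or u = v).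

-- ===== PORT A =====
-- fuel is a totality guard only: inside Pre_ ∧ Dom the loop needs at most 64
-- iterations (each iteration halves one of the ≤ 2^31 labels), so 128 is never hit.
def pvLoopA : Nat → Int → Int → Int → Int
  | 0, _, _, length => length
  | fuel+1, u, v, length =>
    if u ≠ v then
      (if v > u then pvLoopA fuel u (PySem.Int.floordiv v 2) (length + 1)
       else pvLoopA fuel (PySem.Int.floordiv u 2) v (length + 1))
    else length

def cycleLengthQueries (n : Int) (queries : List (List Int)) : List Int :=
  queries.foldl (fun res q =>
    match q with
    | [u, v] => res ++ [pvLoopA 128 u v 1]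
    | _ => res) []

-- ===== PORT B =====
def pvBitsLoop (x : Int) (d : List Int) : List Int :=
  if 0 < x then pvBitsLoop (PySem.Int.floordiv x 2) (d ++ [PySem.Int.mod x 2]) else d
termination_by x.toNat
decreasing_by
  rw [PySem.Int.floordiv_eq_ediv_of_pos (by omega : (0:Int) < 2)]; omega

def pvBits (x : Int) : List Int := (pvBitsLoop x []).reverse

def pvLcp : List Int → List Int → Int
  | [], _ => 0
  | _ :: _, [] => 0
  | x :: a, y :: b => if x = y then 1 + pvLcp a b else 0

def pvCycle (u v : Int) : Int :=
  ((pvBits u).length : Int) + (pvBits v).length - 2 * pvLcp (pvBits u) (pvBits v) + 1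

def cycleLengthQueries_alt (n : Int) (queries : List (List Int)) : List Int :=
  queries.map (fun q =>
    if q.length = 2 then pvCycle (q.getD 0 0) (q.getD 1 0) else 0)

-- ===== PRECONDITION & SPEC =====
-- Pre_ admits exactly the inputs where A returns: each query must be a pair
-- (otherwise Python's unpacking raises ValueError) whose entries are both
-- nonnegative or equal (otherwise A's upward walk never terminates).
def Pre_cycleLengthQueries (n : Int) (queries : List (List Int)) : Prop :=
  ∀ q ∈ queries, q.length = 2 ∧ ((∀ x ∈ q, 0 ≤ x) ∨ q[0]? = q[1]?)
instance (n : Int) (queries : List (List Int)) : Decidable (Pre_cycleLengthQueries n queries) := by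
  unfold Pre_cycleLengthQueries; infer_instance

def pvWitness_cycleLengthQueries : Int × List (List Int) := (2, [[1, 3], [5, 4], [7, 7]])

def Spec_cycleLengthQueries (n : Int) (queries : List (List Int)) (out : List Int) : Prop := out = cycleLengthQueries_alt n queries
instance (n : Int) (queries : List (List Int)) (out : List Int) : Decidable (Spec_cycleLengthQueries n queries out) := by unfold Spec_cycleLengthQueries; infer_instance

-- ===== CLAIM (what is proved, stated in full; the proofs are below) =====
def Claim_equal_cycleLengthQueries : Prop := ∀ (n : Int) (queries : List (List Int)), Dom_cycleLengthQueries n queries → Pre_cycleLengthQueries n queries → Spec_cycleLengthQueries n queries (cycleLengthQueries n queries)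

-- ===== LEMMAS AND PROOFS =====

lemma bitsLoop_nonpos (x : Int) (hx : ¬ 0 < x) (d : List Int) : pvBitsLoop x d = d := by
  unfold pvBitsLoop; simp [hx]

lemma bitsLoop_step (x : Int) (h : 0 < x) (d : List Int) :
    pvBitsLoop x d = pvBitsLoop (PySem.Int.floordiv x 2) (d ++ [PySem.Int.mod x 2]) := by
  conv_lhs => rw [pvBitsLoop]
  rw [if_pos h]

lemma lcp_nil_left (b : List Int) : pvLcp [] b = 0 := by cases b <;> rfl

lemma bitsLoop_acc (fuel : Nat) : ∀ x : Int, ∀ d : List Int, x.toNat ≤ fuel →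
    pvBitsLoop x d = d ++ pvBitsLoop x [] := by
  induction fuel with
  | zero =>
    intro x d hx
    have h : ¬ 0 < x := by omega
    rw [bitsLoop_nonpos x h, bitsLoop_nonpos x h, List.append_nil]
  | succ fuel ih =>
    intro x d hx
    by_cases h : 0 < x
    · have hdiv : PySem.Int.floordiv x 2 = x / 2 :=
        PySem.Int.floordiv_eq_ediv_of_pos (by omega)
      have hle : (x / 2).toNat ≤ fuel := by omega
      rw [bitsLoop_step x h d, bitsLoop_step x h [], hdiv,
        ih (x / 2) (d ++ [PySem.Int.mod x 2]) hle, List.nil_append,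
        ih (x / 2) ([PySem.Int.mod x 2]) hle, List.append_assoc]
    · rw [bitsLoop_nonpos x h, bitsLoop_nonpos x h, List.append_nil]

lemma bits_nonpos (x : Int) (hx : x ≤ 0) : pvBits x = [] := by
  unfold pvBits; rw [bitsLoop_nonpos x (by omega)]; rfl

lemma bits_rec (x : Int) (hx : 1 ≤ x) :
    pvBits x = pvBits (x / 2) ++ [x % 2] := by
  unfold pvBits
  rw [bitsLoop_step x (by omega) [],
    PySem.Int.floordiv_eq_ediv_of_pos (by omega : (0:Int) < 2),
    PySem.Int.mod_eq_emod_of_pos (by omega : (0:Int) < 2), List.nil_append,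
    bitsLoop_acc (x / 2).toNat (x / 2) ([x % 2]) le_rfl]
  simp

def valB (l : List Int) : Int := l.foldl (fun a b => 2 * a + b) 0

lemma foldl_shift (l : List Int) : ∀ a : Int,
    l.foldl (fun s b => 2 * s + b) a = a * 2 ^ l.length + valB l := by
  induction l with
  | nil => intro a; simp [valB]
  | cons x l ih =>
    intro a
    simp only [List.foldl_cons, List.length_cons, valB] at *
    rw [ih (2 * a + x), show (2:Int) * 0 + x = x from by ring, ih x]
    ring

lemma valB_concat (l : List Int) (b : Int) : valB (l ++ [b]) = 2 * valB l + b := by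
  simp [valB, List.foldl_append]

lemma val_bits (fuel : Nat) : ∀ x : Int, 0 ≤ x → x.toNat ≤ fuel → valB (pvBits x) = x := by
  induction fuel with
  | zero =>
    intro x hx hle
    have : x = 0 := by omega
    subst this; rw [bits_nonpos 0 le_rfl]; rfl
  | succ fuel ih =>
    intro x hx hle
    by_cases h : 1 ≤ x
    · rw [bits_rec x h, valB_concat, ih (x / 2) (by omega) (by omega)]
      omega
    · have : x = 0 := by omega
      subst this; rw [bits_nonpos 0 le_rfl]; rfl

lemma bits_mem (fuel : Nat) : ∀ x : Int, x.toNat ≤ fuel → ∀ b ∈ pvBits x, 0 ≤ b ∧ b < 2 := by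
  induction fuel with
  | zero =>
    intro x hle b hb
    rcases le_or_gt x 0 with h | h
    · rw [bits_nonpos x h] at hb; simp at hb
    · omega
  | succ fuel ih =>
    intro x hle b hb
    rcases le_or_gt x 0 with h | h
    · rw [bits_nonpos x h] at hb; simp at hb
    · rw [bits_rec x (by omega)] at hb
      rcases List.mem_append.mp hb with hb | hb
      · exact ih (x / 2) (by omega) b hb
      · simp at hb; omega

lemma val_nonneg_lt (l : List Int) (h : ∀ b ∈ l, 0 ≤ b ∧ b < 2) :
    0 ≤ valB l ∧ valB l < 2 ^ l.length := by
  induction l with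
  | nil => simp [valB]
  | cons x l ih =>
    have hx := h x (by simp)
    have ihl := ih (fun b hb => h b (by simp [hb]))
    have hv : valB (x :: l) = x * 2 ^ l.length + valB l := by
      simp only [valB, List.foldl_cons]
      rw [show (2:Int) * 0 + x = x from by ring, foldl_shift l x]
      rfl
    have hpos : (0:Int) < 2 ^ l.length := by positivity
    constructor
    · rw [hv]
      have : 0 ≤ x * 2 ^ l.length := mul_nonneg hx.1 (by positivity)
      omega
    · rw [hv, List.length_cons, pow_succ]
      have hx1 : x ≤ 1 := by omega
      have : x * 2 ^ l.length ≤ 1 * 2 ^ l.length :=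
        mul_le_mul_of_nonneg_right hx1 (by positivity)
      omega

lemma prefix_le (u v : Int) (hu : 0 ≤ u) (hv : 1 ≤ v)
    (hp : pvBits v <+: pvBits u) : v ≤ u := by
  obtain ⟨t, ht⟩ := hp
  have hmem : ∀ b ∈ pvBits u, 0 ≤ b ∧ b < 2 := bits_mem u.toNat u le_rfl
  have hmt : ∀ b ∈ t, 0 ≤ b ∧ b < 2 := by
    intro b hb; exact hmem b (by rw [← ht]; exact List.mem_append.mpr (Or.inr hb))
  have hvu : valB (pvBits u) = u := val_bits u.toNat u hu le_rfl
  have hvv : valB (pvBits v) = v := val_bits v.toNat v (by omega) le_rfl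
  have hsplit : valB (pvBits u) = v * 2 ^ t.length + valB t := by
    rw [← ht]
    have happ : valB (pvBits v ++ t)
        = List.foldl (fun a b => 2 * a + b) (valB (pvBits v)) t := by
      simp [valB, List.foldl_append]
    rw [happ, hvv, foldl_shift t v]
  have h1 : (1:Int) ≤ 2 ^ t.length := one_le_pow₀ (by omega)
  have h2 : v * 1 ≤ v * 2 ^ t.length := mul_le_mul_of_nonneg_left h1 (by omega)
  have h3 := (val_nonneg_lt t hmt).1
  omega

lemma lcp_self (l : List Int) : pvLcp l l = (l.length : Int) := by
  induction l with
  | nil => rfl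
  | cons x l ih => simp [pvLcp, ih]; push_cast; ring

lemma lcp_le_right (a b : List Int) : pvLcp a b ≤ (b.length : Int) := by
  induction a generalizing b with
  | nil => rw [lcp_nil_left]; positivity
  | cons x a ih =>
    cases b with
    | nil => simp [pvLcp]
    | cons y b =>
      by_cases h : x = y
      · have := ih b; simp [pvLcp, h]; push_cast; omega
      · have : (0:Int) ≤ b.length + 1 := by positivity
        simp [pvLcp, h]; push_cast; omega

lemma lcp_comm (a b : List Int) : pvLcp a b = pvLcp b a := by
  induction a generalizing b with
  | nil => cases b <;> simp [pvLcp]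
  | cons x a ih =>
    cases b with
    | nil => simp [pvLcp]
    | cons y b =>
      by_cases h : x = y
      · subst h; simp [pvLcp, ih b]
      · have h' : ¬ y = x := fun hh => h hh.symm
        simp [pvLcp, h, h']

lemma lcp_prefix (a b : List Int) (h : pvLcp a b = (b.length : Int)) : b <+: a := by
  induction a generalizing b with
  | nil =>
    cases b with
    | nil => exact List.prefix_refl _
    | cons y b => simp [pvLcp] at h; omega
  | cons x a ih =>
    cases b with
    | nil => exact List.nil_prefix
    | cons y b =>
      by_cases hxy : x = y
      · subst hxy
        simp only [pvLcp, List.length_cons] at h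
        have : pvLcp a b = (b.length : Int) := by push_cast at h; omega
        exact List.cons_prefix_cons.mpr ⟨rfl, ih b this⟩
      · simp [pvLcp, hxy] at h
        have := Int.natCast_nonneg b.length; omega

lemma lcp_dropLast (a : List Int) : ∀ b : List Int,
    pvLcp a b < (b.length : Int) → pvLcp a b.dropLast = pvLcp a b := by
  induction a with
  | nil => intro b h; rw [lcp_nil_left, lcp_nil_left]
  | cons x a ih =>
    intro b h
    cases b with
    | nil => exact absurd h (by simp [pvLcp])
    | cons y b =>
      by_cases hxy : x = y
      · subst hxy
        simp only [pvLcp, List.length_cons] at h ⊢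
        cases b with
        | nil =>
          exfalso
          have h0 : pvLcp a [] = 0 := by cases a <;> rfl
          rw [h0] at h; simp at h
        | cons z b =>
          rw [List.dropLast_cons_of_ne_nil (by simp)]
          simp only [pvLcp]
          have hlt : pvLcp a (z :: b) < ((z :: b).length : Int) := by
            push_cast at h ⊢; omega
          rw [ih (z :: b) hlt]
      · simp only [pvLcp, if_neg hxy]
        cases b with
        | nil => simp [pvLcp]
        | cons z b =>
          rw [List.dropLast_cons_of_ne_nil (by simp)]
          simp [pvLcp, hxy]

lemma lcp_drop_key (u v : Int) (hu : 0 ≤ u) (huv : u < v) :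
    pvLcp (pvBits u) ((pvBits v).dropLast) = pvLcp (pvBits u) (pvBits v) := by
  apply lcp_dropLast
  rcases lt_or_eq_of_le (lcp_le_right (pvBits u) (pvBits v)) with h | h
  · exact h
  · exfalso
    have := prefix_le u v hu (by omega) (lcp_prefix _ _ h)
    omega

lemma loop_closed (fuel : Nat) : ∀ u v len : Int, 0 ≤ u → 0 ≤ v →
    (pvBits u).length + (pvBits v).length < fuel →
    pvLoopA fuel u v len =
      len + ((pvBits u).length : Int) + (pvBits v).length
        - 2 * pvLcp (pvBits u) (pvBits v) := by
  induction fuel with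
  | zero => intro u v len _ _ h; omega
  | succ fuel ih =>
    intro u v len hu hv hfuel
    by_cases heq : u = v
    · subst heq
      rw [pvLoopA, if_neg (by simp), lcp_self]
      ring
    · rw [pvLoopA, if_pos heq]
      by_cases hlt : v > u
      · rw [if_pos hlt]
        have hv1 : 1 ≤ v := by omega
        have hrec := bits_rec v hv1
        have hdl : (pvBits v).dropLast = pvBits (v / 2) := by
          rw [hrec, List.dropLast_concat]
        have hlen : (pvBits v).length = (pvBits (v / 2)).length + 1 := by
          rw [hrec]; simp
        have hlcp : pvLcp (pvBits u) (pvBits (v / 2))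
            = pvLcp (pvBits u) (pvBits v) := by
          rw [← hdl]; exact lcp_drop_key u v hu (by omega)
        rw [PySem.Int.floordiv_eq_ediv_of_pos (by omega : (0:Int) < 2),
          ih u (v / 2) (len + 1) hu (by omega) (by omega), hlcp, hlen]
        push_cast; ring
      · rw [if_neg hlt]
        have hvu : v < u := by omega
        have hu1 : 1 ≤ u := by omega
        have hrec := bits_rec u hu1
        have hdl : (pvBits u).dropLast = pvBits (u / 2) := by
          rw [hrec, List.dropLast_concat]
        have hlen : (pvBits u).length = (pvBits (u / 2)).length + 1 := by
          rw [hrec]; simp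
        have hlcp : pvLcp (pvBits (u / 2)) (pvBits v)
            = pvLcp (pvBits u) (pvBits v) := by
          rw [lcp_comm (pvBits (u / 2)) (pvBits v), ← hdl,
            lcp_drop_key v u hv hvu, lcp_comm (pvBits v) (pvBits u)]
        rw [PySem.Int.floordiv_eq_ediv_of_pos (by omega : (0:Int) < 2),
          ih (u / 2) v (len + 1) (by omega) hv (by omega), hlcp, hlen]
        push_cast; ring

lemma bits_len_le (k : Nat) : ∀ x : Int, 0 ≤ x → x < 2 ^ k → (pvBits x).length ≤ k := by
  induction k with
  | zero =>
    intro x hx hlt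
    have : x = 0 := by simpa using (by omega : x = 0)
    subst this; rw [bits_nonpos 0 le_rfl]; simp
  | succ k ih =>
    intro x hx hlt
    by_cases h1 : 1 ≤ x
    · rw [bits_rec x h1]
      have h2 : (2:Int) ^ (k + 1) = 2 * 2 ^ k := by ring
      have : x / 2 < 2 ^ k := by omega
      have := ih (x / 2) (by omega) this
      simp only [List.length_append, List.length_cons, List.length_nil]
      omega
    · have : x = 0 := by omega
      subst this; rw [bits_nonpos 0 le_rfl]; simp

lemma query_eq (u v : Int) (hb : -2147483648 ≤ u ∧ u ≤ 2147483648)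
    (hb' : -2147483648 ≤ v ∧ v ≤ 2147483648)
    (hpre : (0 ≤ u ∧ 0 ≤ v) ∨ u = v) :
    pvLoopA 128 u v 1 = pvCycle u v := by
  by_cases heq : u = v
  · subst heq
    rw [pvLoopA, if_neg (by simp)]
    unfold pvCycle
    rw [lcp_self]; ring
  · rcases hpre with ⟨hu, hv⟩ | h
    · have hul : (pvBits u).length ≤ 32 :=
        bits_len_le 32 u hu (by norm_num; omega)
      have hvl : (pvBits v).length ≤ 32 :=
        bits_len_le 32 v hv (by norm_num; omega)
      rw [loop_closed 128 u v 1 hu hv (by omega)]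
      unfold pvCycle; ring
    · exact absurd h heq

lemma fold_eq_map (queries : List (List Int))
    (h : ∀ q ∈ queries, (q.length = 2 ∧ ((∀ x ∈ q, 0 ≤ x) ∨ q[0]? = q[1]?)) ∧
      (∀ x ∈ q, -2147483648 ≤ x ∧ x ≤ 2147483648)) :
    ∀ acc : List Int,
      queries.foldl (fun res q =>
        match q with
        | [u, v] => res ++ [pvLoopA 128 u v 1]
        | _ => res) acc
      = acc ++ queries.map (fun q =>
        if q.length = 2 then pvCycle (q.getD 0 0) (q.getD 1 0) else 0) := by
  induction queries with
  | nil => intro acc; simp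
  | cons q queries ih =>
    intro acc
    obtain ⟨⟨hlen, hpre⟩, hbnd⟩ := h q (by simp)
    obtain ⟨u, v, rfl⟩ : ∃ u v, q = [u, v] := by
      match q, hlen with
      | [u, v], _ => exact ⟨u, v, rfl⟩
    have hq : pvLoopA 128 u v 1 = pvCycle u v := by
      apply query_eq u v (hbnd u (by simp)) (hbnd v (by simp))
      rcases hpre with h0 | h0
      · exact Or.inl ⟨h0 u (by simp), h0 v (by simp)⟩
      · simp at h0; exact Or.inr h0
    simp only [List.foldl_cons, List.map_cons]
    rw [ih (fun q hq => h q (by simp [hq])) (acc ++ [pvLoopA 128 u v 1]), hq,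
      List.append_assoc]
    simp [pvCycle]

-- ===== VERDICT (by name: the statement is the Claim_ definition above) =====
theorem cycleLengthQueries_spec : Claim_equal_cycleLengthQueries := by
  intro n queries hdom hpre
  unfold Spec_cycleLengthQueries cycleLengthQueries cycleLengthQueries_alt
  have hbnd : ∀ q ∈ queries, ∀ x ∈ q, -2147483648 ≤ x ∧ x ≤ 2147483648 := by
    unfold Dom_cycleLengthQueries at hdom
    simp only [Bool.and_eq_true, List.all_eq_true, pvDomInt,
      decide_eq_true_eq] at hdom
    exact fun q hq x hx => hdom.2 q hq x hx
  rw [fold_eq_map queries (fun q hq => ⟨hpre q hq, hbnd q hq⟩) []]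
  rfl
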